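-- pv_equiv track=rewrite | github.com/alpotap/course_source_builder | doc_crawler.py | ordered_links_from_tree
-- ===== SOURCE A (Python) =====
-- def ordered_links_from_tree(nodes, children, roots, extras):
--     ordered = []
--     seen = set()
--
--     def walk(node):
--         if node in seen:
--             return
--         seen.add(node)
--         ordered.append(node)
--         for child in children.get(node, []):
--             walk(child)
--
--     for root in roots:
--         walk(root)
--
--     for url in extras:
--         if url not in seen:
--             ordered.append(url)
--             seen.add(url)
--
--     return ordered
-- ===== SOURCE B (Python) =====
-- def ordered_links_from_tree(nodes, children, roots, extras):
--     ordered = []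
--     seen = set()
--
--     for root in roots:
--         stack = [root]
--         while stack:
--             node = stack.pop()
--             if node in seen:
--                 continue
--             seen.add(node)
--             ordered.append(node)
--             kids = children.get(node, [])
--             stack.extend(reversed(kids))
--
--     for url in extras:
--         if url not in seen:
--             ordered.append(url)
--             seen.add(url)
--
--     return ordered
-- ===== Notes on version B (the rewrite author's own statement) =====
-- stated objective: alternative
-- what changed: Replaced the recursive nested walk() (call-stack DFS) by an iterative DFS with an explicit list-as-stack: pop a node, skip if seen, record it and push its children reversed so they pop in left-to-right order; the extras pass is unchanged.
import Mathlib
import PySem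

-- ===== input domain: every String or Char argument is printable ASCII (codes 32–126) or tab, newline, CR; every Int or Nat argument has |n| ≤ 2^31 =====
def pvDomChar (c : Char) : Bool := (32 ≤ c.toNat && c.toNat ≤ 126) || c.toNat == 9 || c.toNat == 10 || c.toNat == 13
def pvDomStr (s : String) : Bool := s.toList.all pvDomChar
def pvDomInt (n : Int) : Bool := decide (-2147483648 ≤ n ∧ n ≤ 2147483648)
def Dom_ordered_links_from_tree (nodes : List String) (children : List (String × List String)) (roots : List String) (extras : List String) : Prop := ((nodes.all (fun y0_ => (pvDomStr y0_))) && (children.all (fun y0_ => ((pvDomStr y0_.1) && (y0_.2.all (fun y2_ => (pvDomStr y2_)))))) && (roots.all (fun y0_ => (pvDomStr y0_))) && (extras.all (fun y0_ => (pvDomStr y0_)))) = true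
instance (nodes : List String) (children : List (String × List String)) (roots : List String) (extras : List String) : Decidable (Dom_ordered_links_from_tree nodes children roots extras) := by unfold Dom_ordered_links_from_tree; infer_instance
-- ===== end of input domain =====

-- B replaces A's recursive nested walk() by an iterative DFS with an explicit list-as-stack
-- (pop-time seen check, children pushed reversed); same cost, different decomposition ('alternative').
-- Both ports use a fuel argument solely as a totality guard (the graph may be cyclic); the fuel
-- bound pvFuel is large enough that it is never exhausted (that is what the equivalence proof shows).

-- children.get(node, []) — dict lookup, first match
def pvKids (children : List (String × List String)) (node : String) : List String :=
  PySem.Dict.getD (PySem.Dict.mk children) node []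

-- universe of every node a walk can ever visit (roots and all children values); fuel bound
def pvUlinks (children : List (String × List String)) (roots : List String) : List String :=
  roots ++ (children.map Prod.snd).flatten

def pvFuel (children : List (String × List String)) (roots : List String) : Nat :=
  (pvUlinks children roots).length + 1

-- ===== PORT A =====
-- A's walk(node): if node in seen return; seen.add(node); ordered.append(node); for child in kids: walk(child)
mutual
def pvWalkA (children : List (String × List String)) :
    Nat → String → (PySem.Set String × List String) → (PySem.Set String × List String)
  | 0, _, st => st
  | f + 1, node, st =>
    if PySem.Set.contains st.1 node then st
    else pvWalkListA children f (pvKids children node) (PySem.Set.add st.1 node, st.2 ++ [node])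
  termination_by f _ _ => (f, 0)
def pvWalkListA (children : List (String × List String)) :
    Nat → List String → (PySem.Set String × List String) → (PySem.Set String × List String)
  | _, [], st => st
  | f, c :: cs, st => pvWalkListA children f cs (pvWalkA children f c st)
  termination_by f cs _ => (f, cs.length + 1)
end

def ordered_links_from_tree (nodes : List String) (children : List (String × List String)) (roots : List String) (extras : List String) : List String :=
  (extras.foldl
    (fun (st : PySem.Set String × List String) url =>
      if PySem.Set.contains st.1 url then st else (PySem.Set.add st.1 url, st.2 ++ [url]))
    (roots.foldl (fun st root => pvWalkA children (pvFuel children roots) root st)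
      (PySem.Set.empty, []))).2

-- ===== PORT B =====
-- B's while-loop; the stack is modelled head-as-top (Python appends reversed(kids) and pops from
-- the end, which is exactly prepending kids here).
def pvStackB (children : List (String × List String)) :
    Nat → List String → (PySem.Set String × List String) → (PySem.Set String × List String)
  | _, [], st => st
  | f, node :: stack, st =>
    if PySem.Set.contains st.1 node then pvStackB children f stack st
    else match f with
      | 0 => st
      | f' + 1 =>
        pvStackB children f' (pvKids children node ++ stack)
          (PySem.Set.add st.1 node, st.2 ++ [node])
termination_by f stack _ => (f, stack.length)

def ordered_links_from_tree_alt (nodes : List String) (children : List (String × List String)) (roots : List String) (extras : List String) : List String :=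
  (extras.foldl
    (fun (st : PySem.Set String × List String) url =>
      if PySem.Set.contains st.1 url then st else (PySem.Set.add st.1 url, st.2 ++ [url]))
    (roots.foldl (fun st root => pvStackB children (pvFuel children roots) [root] st)
      (PySem.Set.empty, []))).2

-- ===== PRECONDITION & SPEC =====
def Spec_ordered_links_from_tree (nodes : List String) (children : List (String × List String)) (roots : List String) (extras : List String) (out : List String) : Prop := out = ordered_links_from_tree_alt nodes children roots extras
instance (nodes : List String) (children : List (String × List String)) (roots : List String) (extras : List String) (out : List String) : Decidable (Spec_ordered_links_from_tree nodes children roots extras out) := by unfold Spec_ordered_links_from_tree; infer_instance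

-- ===== CLAIM (what is proved, stated in full; the proofs are below) =====
def Claim_equal_ordered_links_from_tree : Prop := ∀ (nodes : List String) (children : List (String × List String)) (roots : List String) (extras : List String), Dom_ordered_links_from_tree nodes children roots extras → Spec_ordered_links_from_tree nodes children roots extras (ordered_links_from_tree nodes children roots extras)

-- ===== LEMMAS AND PROOFS =====

-- number of universe entries not yet seen (the potential that shrinks at every fresh node)
def pvPhi (U seen : List String) : Nat := U.countP (fun x => !(PySem.Set.contains seen x))

theorem pvPhi_eq (U seen : List String) :
    pvPhi U seen = U.countP (fun x => !decide (x ∈ seen)) := by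
  unfold pvPhi; congr 1; funext x; simp

theorem pvPhi_le (U seen : List String) : pvPhi U seen ≤ U.length :=
  List.countP_le_length

theorem pvPhi_mono (U s t : List String) (h : ∀ x, x ∈ s → x ∈ t) :
    pvPhi U t ≤ pvPhi U s := by
  rw [pvPhi_eq, pvPhi_eq]
  induction U with
  | nil => simp
  | cons u U ih =>
    simp only [List.countP_cons]
    by_cases hu : u ∈ t
    · have hus : decide (u ∈ t) = true := by simp [hu]
      simp [hus]; omega
    · have hus : u ∉ s := fun hs => hu (h u hs)
      simp [hu, hus]; omega

theorem pvPhi_pos (U seen : List String) (c : String) (hU : c ∈ U) (hc : c ∉ seen) :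
    1 ≤ pvPhi U seen := by
  rw [pvPhi_eq]
  induction U with
  | nil => cases hU
  | cons u U ih =>
    simp only [List.countP_cons]
    rcases List.mem_cons.mp hU with h | h
    · subst h; simp [hc]
    · have := ih h; omega

theorem pvPhi_add (U seen : List String) (c : String) :
    pvPhi U (PySem.Set.add seen c) =
      U.countP (fun x => !decide (x ∈ seen) && !decide (x = c)) := by
  rw [pvPhi_eq]; congr 1; funext x
  simp [PySem.Set.mem_add]

theorem pvPhi_add_lt (U seen : List String) (c : String) (hU : c ∈ U) (hc : c ∉ seen) :
    pvPhi U (PySem.Set.add seen c) < pvPhi U seen := by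
  rw [pvPhi_add U seen c, pvPhi_eq]
  induction U with
  | nil => cases hU
  | cons u U ih =>
    simp only [List.countP_cons]
    have hle : U.countP (fun x => !decide (x ∈ seen) && !decide (x = c))
        ≤ U.countP (fun x => !decide (x ∈ seen)) := by
      apply List.countP_mono_left
      intro x _ hx
      simp at hx ⊢
      exact hx.1
    rcases List.mem_cons.mp hU with h | h
    · subst h
      simp [hc]
      omega
    · have := ih h
      by_cases h1 : u ∈ seen <;> by_cases h2 : u = c <;> simp [h1, h2] <;> omega

-- every looked-up child is one of children's values
theorem pvKids_getD (k : String) (v : List String) (rest : List (String × List String)) (node : String) :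
    PySem.Dict.getD (PySem.Dict.mk ((k, v) :: rest)) node [] =
      if k == node then v else PySem.Dict.getD (PySem.Dict.mk rest) node [] := by
  unfold PySem.Dict.getD
  rw [PySem.Dict.get?_mk_cons]
  split <;> rfl

theorem pvKids_subset (children : List (String × List String)) (node : String) :
    ∀ x ∈ pvKids children node, x ∈ (children.map Prod.snd).flatten := by
  induction children with
  | nil => intro x hx; simp [pvKids, PySem.Dict.getD, PySem.Dict.get?] at hx
  | cons p rest ih =>
    obtain ⟨k, v⟩ := p
    intro x hx
    simp only [pvKids, pvKids_getD] at hx ih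
    by_cases h : k == node
    · simp [h] at hx
      simp [List.mem_flatten]
      exact Or.inl hx
    · simp [h] at hx
      have := ih x hx
      simp [List.mem_flatten] at this ⊢
      tauto

-- one-step unfoldings of the stack loop
theorem pvStackB_nil (children : List (String × List String)) (f : Nat)
    (st : PySem.Set String × List String) : pvStackB children f [] st = st := by
  rw [pvStackB.eq_def]

theorem pvStackB_cons (children : List (String × List String)) (f : Nat) (node : String)
    (stack : List String) (st : PySem.Set String × List String) :
    pvStackB children f (node :: stack) st =
      if PySem.Set.contains st.1 node then pvStackB children f stack st
      else match f with
        | 0 => st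
        | f' + 1 =>
          pvStackB children f' (pvKids children node ++ stack)
            (PySem.Set.add st.1 node, st.2 ++ [node]) := by
  rw [pvStackB.eq_def]

-- walkA/walkListA only grow seen
theorem pvWalk_mem (children : List (String × List String)) :
    ∀ f : Nat,
      (∀ (node : String) (st : PySem.Set String × List String) (x : String),
        x ∈ st.1 → x ∈ (pvWalkA children f node st).1) ∧
      (∀ (cs : List String) (st : PySem.Set String × List String) (x : String),
        x ∈ st.1 → x ∈ (pvWalkListA children f cs st).1) := by
  intro f
  induction f with
  | zero =>
    constructor
    · intro node st x hx; simpa [pvWalkA] using hx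
    · intro cs
      induction cs with
      | nil => intro st x hx; simpa [pvWalkListA] using hx
      | cons c cs ih =>
        intro st x hx
        rw [pvWalkListA]
        exact ih _ _ (by simpa [pvWalkA] using hx)
  | succ f ihf =>
    have hnode : ∀ (node : String) (st : PySem.Set String × List String) (x : String),
        x ∈ st.1 → x ∈ (pvWalkA children (f + 1) node st).1 := by
      intro node st x hx
      rw [pvWalkA]
      split
      · exact hx
      · exact ihf.2 _ _ _ ((PySem.Set.mem_add _ _ _).mpr (Or.inl hx))
    refine ⟨hnode, ?_⟩
    intro cs
    induction cs with
    | nil => intro st x hx; simpa [pvWalkListA] using hx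
    | cons c cs ih =>
      intro st x hx
      rw [pvWalkListA]
      exact ih _ _ (hnode _ _ _ hx)

theorem pvWalkA_of_seen (children : List (String × List String)) (f : Nat) (c : String)
    (st : PySem.Set String × List String) (h : c ∈ st.1) :
    pvWalkA children f c st = st := by
  cases f with
  | zero => rw [pvWalkA]
  | succ f =>
    have hc : PySem.Set.contains st.1 c = true := by simp [h]
    rw [pvWalkA, hc]
    rfl

-- KEY LEMMA: processing a block cs on the stack equals folding A's walk over cs.
theorem pvMain (children : List (String × List String)) (U : List String)
    (hU : ∀ x ∈ (children.map Prod.snd).flatten, x ∈ U) :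
    ∀ n : Nat, ∀ f : Nat, n ≤ f →
      ∀ cs : List String, (∀ c ∈ cs, c ∈ U) →
      ∀ (seen : PySem.Set String) (ord rest : List String) (g : Nat),
        pvPhi U seen ≤ n → pvPhi U seen ≤ g →
        ∃ g', pvPhi U (pvWalkListA children f cs (seen, ord)).1 ≤ g' ∧
          pvStackB children g (cs ++ rest) (seen, ord) =
            pvStackB children g' rest (pvWalkListA children f cs (seen, ord)) := by
  intro n
  induction n using Nat.strong_induction_on with
  | _ n ihn =>
    intro f hnf cs
    induction cs with
    | nil =>
      intro _ seen ord rest g hn hg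
      refine ⟨g, ?_, ?_⟩
      · rw [pvWalkListA]; exact hg
      · rw [pvWalkListA]; simp
    | cons c cs ihcs =>
      intro hcs seen ord rest g hn hg
      by_cases hseen : c ∈ seen
      · -- stack pops a seen node; walk returns immediately
        have hA : pvWalkA children f c (seen, ord) = (seen, ord) :=
          pvWalkA_of_seen children f c (seen, ord) hseen
        have hstep : pvStackB children g ((c :: cs) ++ rest) (seen, ord) =
            pvStackB children g (cs ++ rest) (seen, ord) := by
          rw [List.cons_append, pvStackB_cons]
          simp [hseen]
        rw [hstep, pvWalkListA, hA]
        exact ihcs (fun x hx => hcs x (List.mem_cons_of_mem _ hx)) seen ord rest g hn hg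
      · -- fresh node
        have hcU : c ∈ U := hcs c List.mem_cons_self
        have hpos : 1 ≤ pvPhi U seen := pvPhi_pos U seen c hcU hseen
        have hcont : PySem.Set.contains seen c = false := by
          simp [hseen]
        obtain ⟨g0, rfl⟩ : ∃ g0, g = g0 + 1 := ⟨g - 1, by omega⟩
        obtain ⟨f0, rfl⟩ : ∃ f0, f = f0 + 1 := ⟨f - 1, by omega⟩
        set seen1 := PySem.Set.add seen c with hseen1
        set ord1 := ord ++ [c] with hord1
        have hphi1 : pvPhi U seen1 < pvPhi U seen := pvPhi_add_lt U seen c hcU hseen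
        have hstep : pvStackB children (g0 + 1) ((c :: cs) ++ rest) (seen, ord) =
            pvStackB children g0 (pvKids children c ++ (cs ++ rest)) (seen1, ord1) := by
          rw [List.cons_append, pvStackB_cons, hcont]
          rfl
        have hwalk : pvWalkA children (f0 + 1) c (seen, ord) =
            pvWalkListA children f0 (pvKids children c) (seen1, ord1) := by
          rw [pvWalkA, hcont]
          rfl
        -- inner block: the children of c
        obtain ⟨g1, hg1, heq1⟩ :=
          ihn (n - 1) (by omega) f0 (by omega) (pvKids children c)
            (fun x hx => hU x (pvKids_subset children c x hx))
            seen1 ord1 (cs ++ rest) g0 (by omega) (by omega)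
        set st2 := pvWalkListA children f0 (pvKids children c) (seen1, ord1) with hst2
        -- continue with cs from st2
        have hmem2 : ∀ x, x ∈ seen1 → x ∈ st2.1 := fun x hx =>
          (pvWalk_mem children f0).2 (pvKids children c) (seen1, ord1) x hx
        have hphi2 : pvPhi U st2.1 ≤ pvPhi U seen1 := pvPhi_mono U seen1 st2.1 hmem2
        obtain ⟨g2, hg2, heq2⟩ :=
          ihcs (fun x hx => hcs x (List.mem_cons_of_mem _ hx)) st2.1 st2.2 rest g1
            (by omega) (by omega)
        refine ⟨g2, ?_, ?_⟩
        · rw [pvWalkListA, hwalk]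
          exact hg2
        · rw [hstep, heq1, pvWalkListA, hwalk]
          exact heq2

-- processing the roots one by one: the two loops agree
theorem pvRoots (children : List (String × List String)) (roots : List String) :
    ∀ rs : List String, (∀ r ∈ rs, r ∈ pvUlinks children roots) →
    ∀ st : PySem.Set String × List String,
      rs.foldl (fun st root => pvStackB children (pvFuel children roots) [root] st) st =
      rs.foldl (fun st root => pvWalkA children (pvFuel children roots) root st) st := by
  intro rs
  induction rs with
  | nil => intro _ st; rfl
  | cons r rs ih =>
    intro hrs st
    obtain ⟨seen, ord⟩ := st
    have hr : r ∈ pvUlinks children roots := hrs r List.mem_cons_self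
    obtain ⟨g', -, heq⟩ :=
      pvMain children (pvUlinks children roots)
        (fun x hx => List.mem_append_right roots hx)
        (pvPhi (pvUlinks children roots) seen) (pvFuel children roots)
        (by have := pvPhi_le (pvUlinks children roots) seen
            simp only [pvFuel]; omega)
        [r] (fun c hc => by rw [List.mem_singleton] at hc; subst hc; exact hr)
        seen ord [] (pvFuel children roots) le_rfl
        (by have := pvPhi_le (pvUlinks children roots) seen
            simp only [pvFuel]; omega)
    simp only [List.append_nil] at heq
    have hsingle : pvWalkListA children (pvFuel children roots) [r] (seen, ord) =
        pvWalkA children (pvFuel children roots) r (seen, ord) := by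
      rw [pvWalkListA, pvWalkListA]
    rw [List.foldl_cons, List.foldl_cons, heq, pvStackB_nil, hsingle]
    exact ih (fun x hx => hrs x (List.mem_cons_of_mem _ hx)) _

-- ===== VERDICT (by name: the statement is the Claim_ definition above) =====
theorem ordered_links_from_tree_spec : Claim_equal_ordered_links_from_tree := by
  intro nodes children roots extras _
  unfold Spec_ordered_links_from_tree ordered_links_from_tree ordered_links_from_tree_alt
  rw [pvRoots children roots roots
    (fun r hr => List.mem_append_left _ hr) (PySem.Set.empty, [])]
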